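-- pv_equiv track=rewrite | github.com/Zignov/FRI | FirstYear/FirstSemester/Python/DomaceNaloge/Ocena2/testi.py | casi
-- ===== SOURCE A (Python) =====
-- def casi(dnevnik):
--     rezultat = {}
--
--     for zapis in dnevnik:
--         cas, stevilka, akcija, kdo, rezultat_zapisa = zapis
--         if stevilka not in rezultat:
--             rezultat[stevilka] = []
--
--         rezultat[stevilka].append(cas)
--
--     for stevilka, cas in rezultat.items():
--         rezultat[stevilka] = max(cas) - min(cas)
--
--     return rezultat
-- ===== SOURCE B (Python) =====
-- def casi(dnevnik):
--     ext = {}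
--     for cas, stevilka, akcija, kdo, rez in dnevnik:
--         if stevilka in ext:
--             lo, hi = ext[stevilka]
--             ext[stevilka] = (min(lo, cas), max(hi, cas))
--         else:
--             ext[stevilka] = (cas, cas)
--     return {st: hi - lo for st, (lo, hi) in ext.items()}
-- ===== Notes on version B (the rewrite author's own statement) =====
-- stated objective: alternative
-- what changed: B maintains only a running (min, max) pair per id in one pass and finalizes to max-min, instead of A's building a full list of times per id and then re-scanning every list with max()/min(); space drops from O(n) to O(k) for k distinct ids, running time is comparable.
import Mathlib
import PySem

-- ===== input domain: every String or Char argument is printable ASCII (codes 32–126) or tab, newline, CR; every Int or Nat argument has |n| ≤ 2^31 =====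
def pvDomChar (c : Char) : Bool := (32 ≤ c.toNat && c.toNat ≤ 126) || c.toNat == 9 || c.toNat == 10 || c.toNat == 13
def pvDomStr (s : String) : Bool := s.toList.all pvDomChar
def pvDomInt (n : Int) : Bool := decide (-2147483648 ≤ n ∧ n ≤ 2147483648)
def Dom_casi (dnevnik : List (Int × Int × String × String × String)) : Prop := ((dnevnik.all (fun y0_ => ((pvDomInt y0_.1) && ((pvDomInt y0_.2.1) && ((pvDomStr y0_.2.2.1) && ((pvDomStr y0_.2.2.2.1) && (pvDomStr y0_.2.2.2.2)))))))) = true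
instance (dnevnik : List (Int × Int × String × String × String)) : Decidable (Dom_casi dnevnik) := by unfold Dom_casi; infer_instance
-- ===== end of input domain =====

-- B replaces A's per-id list-collecting pass plus a max()/min() rescan by a single pass
-- keeping only a running (min, max) pair per id (objective: alternative; O(k) instead of O(n) extra space).

-- ===== PORT A =====
-- first loop: group times by id (if-absent-insert-[], then append)
def casiGroups (dnevnik : List (Int × Int × String × String × String)) :
    PySem.Dict Int (List Int) :=
  dnevnik.foldl (fun rezultat zapis =>
    let rezultat' := if rezultat.contains zapis.2.1 then rezultat
                     else rezultat.insert zapis.2.1 []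
    rezultat'.modify zapis.2.1 [] (fun l => l ++ [zapis.1])) PySem.Dict.empty

-- second loop overwrites each (existing) key's value in place, which keeps insertion
-- order; the value type changes (list → int), so in Lean it is the association list
-- of the resulting dict that is built, entry by entry in the same order.
def casi (dnevnik : List (Int × Int × String × String × String)) : List (Int × Int) :=
  (casiGroups dnevnik).items.foldl (fun out p =>
    out ++ [(p.1, (PySem.List.max? p.2 (fun x => x)).getD 0
                  - (PySem.List.min? p.2 (fun x => x)).getD 0)]) []
  -- max(cas)/min(cas): the grouped lists are never empty, so the `.getD 0` default is never used

-- ===== PORT B =====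
def casiExtrema (dnevnik : List (Int × Int × String × String × String)) :
    PySem.Dict Int (Int × Int) :=
  dnevnik.foldl (fun ext zapis =>
    match ext.get? zapis.2.1 with
    | some (lo, hi) => ext.insert zapis.2.1 (min lo zapis.1, max hi zapis.1)
    | none => ext.insert zapis.2.1 (zapis.1, zapis.1)) PySem.Dict.empty

def casi_alt (dnevnik : List (Int × Int × String × String × String)) : List (Int × Int) :=
  (casiExtrema dnevnik).items.map (fun p => (p.1, p.2.2 - p.2.1))

-- ===== PRECONDITION & SPEC =====
def Spec_casi (dnevnik : List (Int × Int × String × String × String)) (out : List (Int × Int)) : Prop := out = casi_alt dnevnik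
instance (dnevnik : List (Int × Int × String × String × String)) (out : List (Int × Int)) : Decidable (Spec_casi dnevnik out) := by unfold Spec_casi; infer_instance

-- ===== CLAIM (what is proved, stated in full; the proofs are below) =====
def Claim_equal_casi : Prop := ∀ (dnevnik : List (Int × Int × String × String × String)), Dom_casi dnevnik → Spec_casi dnevnik (casi dnevnik)

-- ===== LEMMAS AND PROOFS =====

-- Invariant tying A's group dict to B's extrema dict after processing the same prefix.
def CasiInv (rA : PySem.Dict Int (List Int)) (rB : PySem.Dict Int (Int × Int)) : Prop :=
  rA.keys = rB.keys ∧ rA.keys.Nodup ∧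
  ∀ k ∈ rA.keys, ∃ c t, rA.getD k [] = c :: t ∧
    rB.getD k (0, 0) = (t.foldl min c, t.foldl max c)

theorem Inv_empty : CasiInv PySem.Dict.empty PySem.Dict.empty := by
  refine ⟨rfl, List.nodup_nil, ?_⟩
  intro k hk; simp [PySem.Dict.empty, PySem.Dict.keys] at hk

theorem Inv_step (rA : PySem.Dict Int (List Int)) (rB : PySem.Dict Int (Int × Int))
    (h : CasiInv rA rB) (z : Int × Int × String × String × String) :
    CasiInv ((if rA.contains z.2.1 then rA else rA.insert z.2.1 []).modify z.2.1 []
          (fun l => l ++ [z.1]))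
        (match rB.get? z.2.1 with
         | some (lo, hi) => rB.insert z.2.1 (min lo z.1, max hi z.1)
         | none => rB.insert z.2.1 (z.1, z.1)) := by
  obtain ⟨hkeys, hnd, hval⟩ := h
  set k0 := z.2.1 with hk0
  by_cases hc : rA.contains k0 = true
  · -- key already present in both dicts
    have hcB : rB.contains k0 = true := by
      rw [PySem.Dict.contains_iff_mem_keys] at hc ⊢; rwa [← hkeys]
    obtain ⟨c, t, hA, hB⟩ := hval k0 (by rwa [PySem.Dict.contains_iff_mem_keys] at hc)
    have hBget : rB.get? k0 = some (t.foldl min c, t.foldl max c) := by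
      have := PySem.Dict.getD_eq_get?_getD rB k0 ((0 : Int), (0 : Int))
      rcases hget : rB.get? k0 with _ | v
      · rw [PySem.Dict.contains_eq_isSome_get?, hget] at hcB; simp at hcB
      · rw [hget] at this; simp at this; rw [hB] at this; rw [this]
    rw [hBget]
    simp only [hc, if_true]
    refine ⟨?_, ?_, ?_⟩
    · rw [PySem.Dict.keys_modify]
      rw [PySem.Dict.keys_insert_of_contains _ _ hc, hkeys,
          PySem.Dict.keys_insert_of_contains _ _ hcB]
    · rw [PySem.Dict.keys_modify, PySem.Dict.keys_insert_of_contains _ _ hc]; exact hnd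
    · intro k hk
      rw [PySem.Dict.keys_modify, PySem.Dict.keys_insert_of_contains _ _ hc] at hk
      by_cases hkk : k = k0
      · subst hkk
        refine ⟨c, t ++ [z.1], ?_, ?_⟩
        · rw [PySem.Dict.getD_modify_self, hA]; simp
        · rw [PySem.Dict.getD_insert_self]
          simp [List.foldl_append]
      · obtain ⟨c', t', hA', hB'⟩ := hval k hk
        exact ⟨c', t', by rw [PySem.Dict.getD_modify, if_neg hkk, hA'],
               by rw [PySem.Dict.getD_insert, if_neg hkk, hB']⟩
  · -- fresh key: both dicts append it
    have hc' : rA.contains k0 = false := by simpa using hc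
    have hcB : rB.contains k0 = false := by
      rw [Bool.eq_false_iff]; intro hcB
      rw [PySem.Dict.contains_iff_mem_keys] at hcB
      exact hc (by rw [PySem.Dict.contains_iff_mem_keys, hkeys]; exact hcB)
    have hBget : rB.get? k0 = none := by
      rw [PySem.Dict.contains_eq_isSome_get?] at hcB
      rcases hget : rB.get? k0 with _ | v
      · rfl
      · rw [hget] at hcB; simp at hcB
    rw [hBget]
    simp only [hc', Bool.false_eq_true, if_false]
    have hkA : ((rA.insert k0 []).modify k0 [] (fun l => l ++ [z.1])).keys
        = rA.keys ++ [k0] := by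
      rw [PySem.Dict.keys_modify, PySem.Dict.keys_insert_of_contains, PySem.Dict.keys_insert_of_not_contains _ _ hc']
      exact PySem.Dict.contains_insert_self _ _ _
    refine ⟨?_, ?_, ?_⟩
    · rw [hkA, PySem.Dict.keys_insert_of_not_contains _ _ hcB, hkeys]
    · rw [hkA]
      have : k0 ∉ rA.keys := fun hm =>
        hc ((PySem.Dict.contains_iff_mem_keys rA k0).mpr hm)
      rw [List.nodup_append]
      refine ⟨hnd, List.nodup_cons.mpr ⟨by simp, List.nodup_nil⟩, ?_⟩
      intro a ha b hb
      simp only [List.mem_singleton] at hb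
      subst hb
      intro hab
      exact this (hab ▸ ha)
    · intro k hk
      rw [hkA] at hk
      by_cases hkk : k = k0
      · subst hkk
        refine ⟨z.1, [], ?_, ?_⟩
        · rw [PySem.Dict.getD_modify_self, PySem.Dict.getD_insert_self, List.nil_append]
        · rw [PySem.Dict.getD_insert_self]; simp
      · have hk' : k ∈ rA.keys := by
          rcases List.mem_append.mp hk with h | h
          · exact h
          · simp at h; exact absurd h hkk
        obtain ⟨c', t', hA', hB'⟩ := hval k hk'
        refine ⟨c', t', ?_, ?_⟩
        · rw [PySem.Dict.getD_modify, if_neg hkk, PySem.Dict.getD_insert, if_neg hkk, hA']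
        · rw [PySem.Dict.getD_insert, if_neg hkk, hB']

theorem Inv_holds (dnevnik : List (Int × Int × String × String × String)) :
    CasiInv (casiGroups dnevnik) (casiExtrema dnevnik) := by
  unfold casiGroups casiExtrema
  suffices h : ∀ (l : List (Int × Int × String × String × String)) rA rB, CasiInv rA rB →
      CasiInv (l.foldl (fun rezultat zapis =>
            let rezultat' := if rezultat.contains zapis.2.1 then rezultat
                             else rezultat.insert zapis.2.1 []
            rezultat'.modify zapis.2.1 [] (fun l => l ++ [zapis.1])) rA)
          (l.foldl (fun ext zapis =>
            match ext.get? zapis.2.1 with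
            | some (lo, hi) => ext.insert zapis.2.1 (min lo zapis.1, max hi zapis.1)
            | none => ext.insert zapis.2.1 (zapis.1, zapis.1)) rB) by
    exact h dnevnik _ _ Inv_empty
  intro l
  induction l with
  | nil => intro rA rB h; exact h
  | cons z t ih =>
    intro rA rB h
    exact ih _ _ (Inv_step rA rB h z)

-- ===== VERDICT (by name: the statement is the Claim_ definition above) =====
theorem casi_spec : Claim_equal_casi := by
  intro dnevnik _
  unfold Spec_casi casi casi_alt
  obtain ⟨hkeys, hnd, hval⟩ := Inv_holds dnevnik
  have hndB : (casiExtrema dnevnik).keys.Nodup := hkeys ▸ hnd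
  rw [PySem.List.foldl_append_singleton_eq_map, List.nil_append,
      PySem.Dict.items_eq_map_keys _ hnd ([] : List Int),
      PySem.Dict.items_eq_map_keys _ hndB ((0 : Int), (0 : Int)),
      ← hkeys, List.map_map, List.map_map]
  refine List.map_congr_left ?_
  intro k hk
  obtain ⟨c, t, hA, hB⟩ := hval k hk
  simp only [Function.comp, hA, hB, PySem.List.max?_id_cons, PySem.List.min?_id_cons,
    Option.getD_some]
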